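-- pv_equiv track=rewrite | github.com/goldsergeant/Algorithm-problem-solving | 프로그래머스/2/150369. 택배 배달과 수거하기/택배 배달과 수거하기.py | solution
-- ===== SOURCE A (Python) =====
-- def solution(cap, n, deliveries, pickups):
--     answer = 0
--     delivery=0
--     pickup=0
--     for i in range(n-1,-1,-1):
--         if deliveries[i]>0 or pickups[i]>0:
--             cnt=0
--             while delivery<deliveries[i] or pickup<pickups[i]:
--                 delivery+=cap
--                 pickup+=cap
--                 cnt+=1
--
--             delivery-=deliveries[i]
--             pickup-=pickups[i]
--             answer+=(i+1)*cnt*2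
--
--     return answer
-- ===== SOURCE B (Python) =====
-- def solution(cap, n, deliveries, pickups):
--     # Same route scan, but each house's trip count is computed by ceiling
--     # division instead of simulating trips one by one in a while loop.
--     answer = 0
--     have_d = 0
--     have_p = 0
--     for i in range(n - 1, -1, -1):
--         d = deliveries[i]
--         p = pickups[i]
--         if d > 0 or p > 0:
--             trips = max(-((have_d - d) // cap), -((have_p - p) // cap), 0)
--             answer += 2 * (i + 1) * trips
--             have_d += trips * cap - d
--             have_p += trips * cap - p
--     return answer
-- ===== Notes on version B (the rewrite author's own statement) =====
-- stated objective: alternative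
-- what changed: The inner while loop that simulates trips one capacity at a time is replaced by a closed-form trip count via ceiling division; cost per house no longer depends on the demand size.
import Mathlib
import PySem

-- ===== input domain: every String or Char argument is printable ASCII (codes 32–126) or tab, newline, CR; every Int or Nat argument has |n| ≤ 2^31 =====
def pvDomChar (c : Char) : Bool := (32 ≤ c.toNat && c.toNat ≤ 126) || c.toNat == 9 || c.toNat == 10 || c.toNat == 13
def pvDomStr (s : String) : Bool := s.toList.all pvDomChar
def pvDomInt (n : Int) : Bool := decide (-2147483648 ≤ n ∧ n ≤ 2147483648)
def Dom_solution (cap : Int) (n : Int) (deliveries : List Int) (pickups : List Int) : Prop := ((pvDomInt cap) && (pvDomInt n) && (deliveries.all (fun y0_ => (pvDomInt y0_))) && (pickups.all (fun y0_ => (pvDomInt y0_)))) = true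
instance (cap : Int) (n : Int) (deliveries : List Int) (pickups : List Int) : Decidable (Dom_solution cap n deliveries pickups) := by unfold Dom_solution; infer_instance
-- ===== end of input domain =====

-- B replaces A's per-trip inner while loop with a closed-form ceiling-division trip count (alternative algorithm; per-house work independent of demand size).

-- ===== PORT A =====
-- Python's unbounded `while delivery<deliveries[i] or pickup<pickups[i]` loop, made
-- total with fuel; the fuel passed at the call site exceeds the iteration count
-- whenever cap > 0 (Pre_), so the port is exact on Pre_.
def solWhile (cap dI pI : Int) : Int → Int → Int → Nat → Int × Int × Int
  | delivery, pickup, cnt, 0 => (delivery, pickup, cnt)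
  | delivery, pickup, cnt, fuel+1 =>
      if delivery < dI ∨ pickup < pI then
        solWhile cap dI pI (delivery + cap) (pickup + cap) (cnt + 1) fuel
      else (delivery, pickup, cnt)

def solution (cap : Int) (n : Int) (deliveries : List Int) (pickups : List Int) : Int :=
  -- deliveries[i] / pickups[i]: pyGetD with default 0; Pre_ keeps every index in range,
  -- exactly where Python does not raise IndexError.
  let s := (PySem.List.pyRange (n - 1) (-1) (-1)).foldl
    (fun (st : Int × Int × Int) i =>
      let answer := st.1; let delivery := st.2.1; let pickup := st.2.2
      let dI := PySem.List.pyGetD deliveries i 0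
      let pI := PySem.List.pyGetD pickups i 0
      if dI > 0 ∨ pI > 0 then
        let r := solWhile cap dI pI delivery pickup 0
                   ((dI - delivery).toNat + (pI - pickup).toNat + 1)
        (answer + (i + 1) * r.2.2 * 2, r.1 - dI, r.2.1 - pI)
      else st)
    (0, 0, 0)
  s.1

-- ===== PORT B =====
def solution_alt (cap : Int) (n : Int) (deliveries : List Int) (pickups : List Int) : Int :=
  ((PySem.List.pyRange (n - 1) (-1) (-1)).foldl
    (fun (st : Int × Int × Int) i =>
      let answer := st.1; let have_d := st.2.1; let have_p := st.2.2
      let dI := PySem.List.pyGetD deliveries i 0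
      let pI := PySem.List.pyGetD pickups i 0
      if dI > 0 ∨ pI > 0 then
        let trips := max (max (-(PySem.Int.floordiv (have_d - dI) cap))
                              (-(PySem.Int.floordiv (have_p - pI) cap))) 0
        (answer + 2 * (i + 1) * trips, have_d + trips * cap - dI, have_p + trips * cap - pI)
      else st)
    (0, 0, 0)).1

-- ===== PRECONDITION & SPEC =====
-- Pre_ excludes exactly the inputs on which Python A does not return: n exceeding a
-- list length (IndexError), and cap ≤ 0 with a positive demand among the first n
-- entries (the while loop never terminates).
def Pre_solution (cap : Int) (n : Int) (deliveries : List Int) (pickups : List Int) : Prop :=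
  n ≤ (deliveries.length : Int) ∧ n ≤ (pickups.length : Int) ∧
    (0 < cap ∨ ((∀ x ∈ deliveries.take n.toNat, x ≤ 0) ∧ (∀ x ∈ pickups.take n.toNat, x ≤ 0)))
instance (cap : Int) (n : Int) (deliveries : List Int) (pickups : List Int) : Decidable (Pre_solution cap n deliveries pickups) := by unfold Pre_solution; infer_instance

def pvWitness_solution : Int × Int × List Int × List Int := (4, 2, [1, 0], [0, 3])

def Spec_solution (cap : Int) (n : Int) (deliveries : List Int) (pickups : List Int) (out : Int) : Prop := out = solution_alt cap n deliveries pickups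
instance (cap : Int) (n : Int) (deliveries : List Int) (pickups : List Int) (out : Int) : Decidable (Spec_solution cap n deliveries pickups out) := by unfold Spec_solution; infer_instance

-- ===== CLAIM (what is proved, stated in full; the proofs are below) =====
def Claim_equal_solution : Prop := ∀ (cap : Int) (n : Int) (deliveries : List Int) (pickups : List Int), Dom_solution cap n deliveries pickups → Pre_solution cap n deliveries pickups → Spec_solution cap n deliveries pickups (solution cap n deliveries pickups)

-- ===== LEMMAS AND PROOFS =====

-- ceiling-division bounds: q := -((x - t) // cap) satisfies (q-1)*cap < t - x ≤ q*cap
theorem ceil_bounds (cap x t : Int) (hcap : 0 < cap) :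
    (-(PySem.Int.floordiv (x - t) cap) - 1) * cap < t - x ∧
      t - x ≤ -(PySem.Int.floordiv (x - t) cap) * cap := by
  have h := (PySem.Int.neg_floordiv_neg_eq_iff_of_pos (a := t - x)
    (b := cap) (q := -(PySem.Int.floordiv (-(t - x)) cap)) hcap).mp rfl
  have hx : -(t - x) = x - t := by ring
  rw [hx] at h
  exact ⟨h.1, h.2⟩

theorem solWhile_spec (cap dI pI : Int) (hcap : 0 < cap) :
    ∀ (fuel : Nat) (hd hp cnt : Int),
      max (max (-(PySem.Int.floordiv (hd - dI) cap)) (-(PySem.Int.floordiv (hp - pI) cap))) 0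
        ≤ (fuel : Int) →
      solWhile cap dI pI hd hp cnt fuel =
        (hd + (max (max (-(PySem.Int.floordiv (hd - dI) cap)) (-(PySem.Int.floordiv (hp - pI) cap))) 0) * cap,
         hp + (max (max (-(PySem.Int.floordiv (hd - dI) cap)) (-(PySem.Int.floordiv (hp - pI) cap))) 0) * cap,
         cnt + (max (max (-(PySem.Int.floordiv (hd - dI) cap)) (-(PySem.Int.floordiv (hp - pI) cap))) 0)) := by
  intro fuel
  induction fuel with
  | zero =>
    intro hd hp cnt hle
    set q1 := -(PySem.Int.floordiv (hd - dI) cap) with hq1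
    set q2 := -(PySem.Int.floordiv (hp - pI) cap) with hq2
    have hk : max (max q1 q2) 0 = 0 := by omega
    simp [solWhile, hk]
  | succ fuel ih =>
    intro hd hp cnt hle
    set q1 := -(PySem.Int.floordiv (hd - dI) cap) with hq1
    set q2 := -(PySem.Int.floordiv (hp - pI) cap) with hq2
    obtain ⟨hb1l, hb1r⟩ := ceil_bounds cap hd dI hcap
    obtain ⟨hb2l, hb2r⟩ := ceil_bounds cap hp pI hcap
    rw [← hq1] at hb1l hb1r
    rw [← hq2] at hb2l hb2r
    by_cases hcond : hd < dI ∨ hp < pI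
    · -- condition holds; k ≥ 1, shift state by cap
      have hq1' : -(PySem.Int.floordiv (hd + cap - dI) cap) = q1 - 1 := by
        rw [hq1, PySem.Int.floordiv_eq_ediv_of_pos hcap, PySem.Int.floordiv_eq_ediv_of_pos hcap]
        have : hd + cap - dI = (hd - dI) + 1 * cap := by ring
        rw [this, Int.add_mul_ediv_right _ _ (by omega : cap ≠ 0)]
        ring
      have hq2' : -(PySem.Int.floordiv (hp + cap - pI) cap) = q2 - 1 := by
        rw [hq2, PySem.Int.floordiv_eq_ediv_of_pos hcap, PySem.Int.floordiv_eq_ediv_of_pos hcap]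
        have : hp + cap - pI = (hp - pI) + 1 * cap := by ring
        rw [this, Int.add_mul_ediv_right _ _ (by omega : cap ≠ 0)]
        ring
      -- k ≥ 1
      have hk1 : 1 ≤ max (max q1 q2) 0 := by
        rcases hcond with h | h
        · have : 0 < dI - hd := by omega
          have hq1pos : 1 ≤ q1 := by
            by_contra hle'
            have hq10 : q1 ≤ 0 := by omega
            have : q1 * cap ≤ 0 := mul_nonpos_of_nonpos_of_nonneg hq10 (le_of_lt hcap)
            omega
          omega
        · have : 0 < pI - hp := by omega
          have hq2pos : 1 ≤ q2 := by
            by_contra hle'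
            have hq20 : q2 ≤ 0 := by omega
            have : q2 * cap ≤ 0 := mul_nonpos_of_nonpos_of_nonneg hq20 (le_of_lt hcap)
            omega
          omega
      have hstep := ih (hd + cap) (hp + cap) (cnt + 1)
      rw [hq1', hq2'] at hstep
      have hkeq : max (max (q1 - 1) (q2 - 1)) 0 = max (max q1 q2) 0 - 1 := by omega
      rw [hkeq] at hstep
      have hres := hstep (by omega)
      show solWhile cap dI pI hd hp cnt (fuel + 1) = _
      rw [solWhile, if_pos hcond, hres]
      refine Prod.ext ?_ (Prod.ext ?_ ?_) <;> simp <;> ring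
    · -- condition fails: hd ≥ dI, hp ≥ pI, so q1 ≤ 0, q2 ≤ 0, k = 0
      push Not at hcond
      have hq1np : q1 ≤ 0 := by
        by_contra h
        have h1 : 1 ≤ q1 := by omega
        have : 0 ≤ (q1 - 1) * cap := mul_nonneg (by omega) (le_of_lt hcap)
        omega
      have hq2np : q2 ≤ 0 := by
        by_contra h
        have h1 : 1 ≤ q2 := by omega
        have : 0 ≤ (q2 - 1) * cap := mul_nonneg (by omega) (le_of_lt hcap)
        omega
      have hk : max (max q1 q2) 0 = 0 := by omega
      rw [hk]
      show solWhile cap dI pI hd hp cnt (fuel + 1) = _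
      rw [solWhile, if_neg (by push Not; exact hcond)]
      simp

-- the trip count is bounded by the total outstanding demand, so A's fuel suffices
theorem k_le_fuel (cap hd hp dI pI : Int) (hcap : 0 < cap) :
    max (max (-(PySem.Int.floordiv (hd - dI) cap)) (-(PySem.Int.floordiv (hp - pI) cap))) 0
      ≤ (((dI - hd).toNat + (pI - hp).toNat + 1 : Nat) : Int) := by
  set q1 := -(PySem.Int.floordiv (hd - dI) cap) with hq1
  set q2 := -(PySem.Int.floordiv (hp - pI) cap) with hq2
  obtain ⟨hb1l, _⟩ := ceil_bounds cap hd dI hcap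
  obtain ⟨hb2l, _⟩ := ceil_bounds cap hp pI hcap
  rw [← hq1] at hb1l
  rw [← hq2] at hb2l
  have h1 : q1 ≤ max (dI - hd) 0 := by
    by_cases h : 1 ≤ q1
    · have : (q1 - 1) ≤ (q1 - 1) * cap := le_mul_of_one_le_right (by omega) hcap
      omega
    · omega
  have h2 : q2 ≤ max (pI - hp) 0 := by
    by_cases h : 1 ≤ q2
    · have : (q2 - 1) ≤ (q2 - 1) * cap := le_mul_of_one_le_right (by omega) hcap
      omega
    · omega
  push_cast
  omega

-- ===== VERDICT (by name: the statement is the Claim_ definition above) =====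
-- with cap ≤ 0 and all first-n demands nonpositive, neither port's guard ever fires
theorem foldl_guard_never (deliveries pickups : List Int) (n : Int)
    (hld : n ≤ (deliveries.length : Int)) (hlp : n ≤ (pickups.length : Int))
    (hd0 : ∀ x ∈ deliveries.take n.toNat, x ≤ 0) (hp0 : ∀ x ∈ pickups.take n.toNat, x ≤ 0)
    (i : Int) (hi : i ∈ PySem.List.pyRange (n - 1) (-1) (-1)) :
    ¬(PySem.List.pyGetD deliveries i 0 > 0 ∨ PySem.List.pyGetD pickups i 0 > 0) := by
  rw [PySem.List.mem_pyRange_neg_one] at hi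
  have h0 : 0 ≤ i := by omega
  have hin : i < n := by omega
  have key : ∀ (xs : List Int), n ≤ (xs.length : Int) → (∀ x ∈ xs.take n.toNat, x ≤ 0) →
      PySem.List.pyGetD xs i 0 ≤ 0 := by
    intro xs hlen hall
    have hlt : i < (xs.length : Int) := by omega
    rw [PySem.List.pyGetD_eq_getElem xs 0 h0 hlt]
    have hidx : i.toNat < (xs.take n.toNat).length := by
      simp [List.length_take]; omega
    have := hall ((xs.take n.toNat)[i.toNat]'hidx) (List.getElem_mem hidx)
    simpa using this
  have h1 := key deliveries hld hd0
  have h2 := key pickups hlp hp0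
  omega

theorem solution_spec : Claim_equal_solution := by
  intro cap n deliveries pickups _hdom hpre
  obtain ⟨hld, hlp, hpre3⟩ := hpre
  unfold Spec_solution solution solution_alt
  simp only []
  rw [PySem.List.foldl_congr_mem (g := fun (st : Int × Int × Int) i =>
      let answer := st.1; let have_d := st.2.1; let have_p := st.2.2
      let dI := PySem.List.pyGetD deliveries i 0
      let pI := PySem.List.pyGetD pickups i 0
      if dI > 0 ∨ pI > 0 then
        let trips := max (max (-(PySem.Int.floordiv (have_d - dI) cap))
                              (-(PySem.Int.floordiv (have_p - pI) cap))) 0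
        (answer + 2 * (i + 1) * trips, have_d + trips * cap - dI, have_p + trips * cap - pI)
      else st)]
  intro st i hi
  rcases hpre3 with hcap | ⟨hd0, hp0⟩
  · -- cap > 0: the while loop computes exactly the ceiling-division trip count
    set dI := PySem.List.pyGetD deliveries i 0
    set pI := PySem.List.pyGetD pickups i 0
    by_cases hg : dI > 0 ∨ pI > 0
    · simp only [hg, if_pos]
      rw [solWhile_spec cap dI pI hcap _ st.2.1 st.2.2 0 (k_le_fuel cap st.2.1 st.2.2 dI pI hcap)]
      refine Prod.ext ?_ (Prod.ext ?_ ?_) <;> simp <;> ring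
    · simp only [hg, if_false]
  · -- cap ≤ 0 admitted only with no positive demand: neither guard fires
    simp only [if_neg (foldl_guard_never deliveries pickups n hld hlp hd0 hp0 i hi)]
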